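-- pv_equiv track=rewrite | github.com/Rayyan9477/Agentic-Document-Extraction-PDF | src/config/settings.py | _is_weak_secret
-- ===== SOURCE A (Python) =====
-- def _is_weak_secret(secret: str) -> bool:
--     """Check if a secret is weak or uses default patterns."""
--     weak_patterns = [
--         "change-this",
--         "your-secret",
--         "your-encryption",
--         "changeme",
--         "password",
--         "secret",
--         "default",
--         "example",
--         "test",
--         "dev-",
--     ]
--     secret_lower = secret.lower()
--     return any(pattern in secret_lower for pattern in weak_patterns)
-- ===== SOURCE B (Python) =====
-- def _is_weak_secret(secret: str) -> bool:
--     """Check if a secret is weak or uses default patterns."""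
--     weak_patterns = [
--         "change-this",
--         "your-secret",
--         "your-encryption",
--         "changeme",
--         "password",
--         "secret",
--         "default",
--         "example",
--         "test",
--         "dev-",
--     ]
--     s = secret.lower()
--     return any(
--         s.startswith(p, i) for i in range(len(s)) for p in weak_patterns
--     )
-- ===== Notes on version B (the rewrite author's own statement) =====
-- stated objective: alternative
-- what changed: Replaces A's per-pattern substring search (one 'in' scan of the lowered secret per pattern) with a single left-to-right scan over start positions that tests at each position whether any weak pattern starts there (the explicit form of a compiled regex alternation pass).
import Mathlib
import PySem

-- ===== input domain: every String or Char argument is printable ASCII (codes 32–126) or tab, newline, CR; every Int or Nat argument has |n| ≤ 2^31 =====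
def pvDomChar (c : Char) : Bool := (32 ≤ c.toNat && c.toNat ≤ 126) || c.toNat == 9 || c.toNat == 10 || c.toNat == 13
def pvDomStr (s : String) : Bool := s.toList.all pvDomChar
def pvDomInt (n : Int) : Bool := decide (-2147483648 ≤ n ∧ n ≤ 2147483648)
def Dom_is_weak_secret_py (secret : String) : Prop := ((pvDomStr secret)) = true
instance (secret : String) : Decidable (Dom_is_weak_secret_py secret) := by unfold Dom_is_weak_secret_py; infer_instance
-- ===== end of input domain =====

-- B replaces A's one-substring-search-per-pattern with a single left-to-right scan of the
-- lowered secret that tests at each position whether some pattern starts there (alternative).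

-- ===== PORT A =====
def pvWeakPatterns : List String :=
  ["change-this", "your-secret", "your-encryption", "changeme", "password",
   "secret", "default", "example", "test", "dev-"]

def is_weak_secret_py (secret : String) : Bool :=
  let weak_patterns := pvWeakPatterns
  let secret_lower := PySem.Str.lower secret
  weak_patterns.any (fun pattern => PySem.Str.isIn pattern secret_lower)

-- ===== PORT B =====
def is_weak_secret_py_alt (secret : String) : Bool :=
  let s := (PySem.Str.lower secret).toList
  -- any(s.startswith(p, i) for i in range(len(s)) for p in weak_patterns)
  (List.range s.length).any (fun i =>
    pvWeakPatterns.any (fun p => PySem.Chars.startswith (s.drop i) p.toList))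

-- ===== PRECONDITION & SPEC =====
def Spec_is_weak_secret_py (secret : String) (out : Bool) : Prop := out = is_weak_secret_py_alt secret
instance (secret : String) (out : Bool) : Decidable (Spec_is_weak_secret_py secret out) := by unfold Spec_is_weak_secret_py; infer_instance

-- ===== CLAIM (what is proved, stated in full; the proofs are below) =====
def Claim_equal_is_weak_secret_py : Prop := ∀ (secret : String), Dom_is_weak_secret_py secret → Spec_is_weak_secret_py secret (is_weak_secret_py secret)

-- ===== LEMMAS AND PROOFS =====

-- A positional scan over all start indices equals the per-pattern substring tests,
-- provided every pattern is nonempty (an empty pattern would match even past the end).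
lemma scan_eq_anyIsIn (s : List Char) (ps : List String)
    (hp : ∀ p ∈ ps, p.toList ≠ []) :
    ((List.range s.length).any (fun i =>
        ps.any (fun p => PySem.Chars.startswith (s.drop i) p.toList)))
      = ps.any (fun p => PySem.Chars.isIn p.toList s) := by
  rw [Bool.eq_iff_iff]
  simp only [List.any_eq_true, List.mem_range, PySem.Chars.startswith_iff]
  constructor
  · rintro ⟨i, _, p, hpmem, hpref⟩
    exact ⟨p, hpmem, (PySem.Chars.exists_prefix_drop_iff_isIn _ _).mp ⟨i, hpref⟩⟩
  · rintro ⟨p, hpmem, hin⟩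
    obtain ⟨j, hpref⟩ := (PySem.Chars.exists_prefix_drop_iff_isIn _ _).mpr hin
    by_cases hj : j < s.length
    · exact ⟨j, hj, p, hpmem, hpref⟩
    · exfalso
      have hnil : s.drop j = [] := List.drop_eq_nil_of_le (Nat.le_of_not_lt hj)
      rw [hnil] at hpref
      exact hp p hpmem (List.prefix_nil.mp hpref)

-- ===== VERDICT (by name: the statement is the Claim_ definition above) =====
theorem is_weak_secret_py_spec : Claim_equal_is_weak_secret_py := by
  intro secret _
  unfold Spec_is_weak_secret_py is_weak_secret_py is_weak_secret_py_alt
  rw [scan_eq_anyIsIn _ _ (by decide)]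
  simp [PySem.Str.isIn]
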